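-- pv_equiv track=rewrite | github.com/kyclark/tiny_python_projects | word_search/search.py | all_combos
-- ===== SOURCE A (Python) =====
-- def all_combos(puzzle):
--     """Find all combos in puzzle"""
--
--     num_rows = len(puzzle)
--     num_cols = len(puzzle[0])
--     combos = []
--
--     # Horizontal
--     for row in puzzle:
--         combos.append(row)
--
--     # Vertical
--     for col_num in range(num_cols):
--         col = [puzzle[row_num][col_num] for row_num in range(num_rows)]
--         combos.append(col)
--
--     # Diagonals Up
--     for row_i in range(1, num_rows):
--         diag = []
--         col_num = 0
--         for row_j in range(row_i, -1, -1):
--             diag.append(puzzle[row_j][col_num])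
--             col_num += 1
--
--         if diag:
--             combos.append(diag)
--
--     for col_i in range(1, num_cols):
--         diag = []
--
--         col_num = col_i
--         for row_num in range(num_rows - 1, -1, -1):
--             diag.append(puzzle[row_num][col_num])
--             col_num += 1
--             if col_num == num_cols:
--                 break
--
--         if diag:
--             combos.append(diag)
--
--     # Diagonals Down
--     for row_i in range(0, num_rows):
--         diag = []
--         col_num = 0
--         for row_j in range(row_i, num_rows):
--             diag.append(puzzle[row_j][col_num])
--             col_num += 1
--             if col_num == num_cols:
--                 break
--
--         if diag:
--             combos.append(diag)
--
--     for col_i in range(1, num_cols):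
--         diag = []
--
--         col_num = col_i
--         for row_num in range(0, num_rows):
--             diag.append(puzzle[row_num][col_num])
--             col_num += 1
--             if col_num == num_cols:
--                 break
--
--         if diag:
--             combos.append(diag)
--
--     combos.extend([list(reversed(c)) for c in combos])
--     return combos
-- ===== SOURCE B (Python) =====
-- def all_combos(puzzle):
--     """Find all combos in puzzle"""
--     num_rows = len(puzzle)
--     num_cols = len(puzzle[0])
--
--     # One row-major pass over every cell, bucketing each cell into its column
--     # and its two diagonals (anti-diagonal key r+c, main-diagonal key r-c).
--     cols, anti, main = {}, {}, {}
--     for r in range(num_rows):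
--         for c in range(num_cols):
--             cell = puzzle[r][c]
--             cols.setdefault(c, []).append(cell)
--             anti.setdefault(r + c, []).insert(0, cell)   # rows descending
--             main.setdefault(r - c, []).append(cell)      # rows ascending
--
--     base = list(puzzle)
--     base += [cols[c] for c in range(num_cols)]
--     base += [anti[s] for s in range(1, num_rows + num_cols - 1)]
--     base += [main[d] for d in range(num_rows)]
--     base += [main[-d] for d in range(1, num_cols)]
--     return base + [list(reversed(c)) for c in base]
-- ===== Notes on version B (the rewrite author's own statement) =====
-- stated objective: alternative
-- what changed: A walks each row, column and diagonal with six separate scanning loops (two with a manual counter-and-break); B makes one row-major pass over all cells, bucketing each cell into dictionaries keyed by its column, its anti-diagonal r+c and its main diagonal r-c, and then just emits the buckets in key order.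
import Mathlib
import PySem

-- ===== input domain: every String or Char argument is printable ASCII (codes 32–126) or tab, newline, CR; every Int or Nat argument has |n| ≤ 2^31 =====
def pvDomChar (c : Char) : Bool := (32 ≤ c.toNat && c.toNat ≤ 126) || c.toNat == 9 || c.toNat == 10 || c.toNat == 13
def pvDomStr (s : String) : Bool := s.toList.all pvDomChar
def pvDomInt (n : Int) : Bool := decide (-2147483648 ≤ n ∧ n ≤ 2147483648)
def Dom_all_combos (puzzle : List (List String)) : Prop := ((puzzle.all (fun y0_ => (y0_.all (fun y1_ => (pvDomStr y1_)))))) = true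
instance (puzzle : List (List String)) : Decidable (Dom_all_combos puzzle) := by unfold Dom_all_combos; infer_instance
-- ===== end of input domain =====

-- B replaces A's six separate line scans by ONE row-major pass over the cells
-- that buckets every cell into dictionaries keyed by its column, its
-- anti-diagonal r+c and its main diagonal r-c, then emits the buckets; return
-- value only (A returns its input's row lists aliased, which a caller could
-- observe; B's Python also returns the same aliased row lists).

-- ===== PORT A =====

-- puzzle[r][c] (both ports read cells through pyGetD; Pre_ keeps all indices in range)
def pvCell (p : List (List String)) (r c : Int) : String :=
  PySem.List.pyGetD (PySem.List.pyGetD p r []) c ""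

-- inner loop of the first "Diagonals Up" block: append cell, col += 1 (no break)
def pvScan (p : List (List String)) : List Int → List String → Int → List String
  | [], diag, _ => diag
  | r :: rest, diag, col => pvScan p rest (diag ++ [pvCell p r col]) (col + 1)

-- the other three inner loops: append cell, col += 1, 'if col == num_cols: break'
def pvScanBrk (p : List (List String)) (C : Int) : List Int → List String → Int → List String
  | [], diag, _ => diag
  | r :: rest, diag, col =>
      let diag' := diag ++ [pvCell p r col]
      if col + 1 == C then diag' else pvScanBrk p C rest diag' (col + 1)

def all_combos (puzzle : List (List String)) : List (List String) :=
  let numRows : Int := puzzle.length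
  let numCols : Int := (PySem.List.pyGetD puzzle 0 []).length
  let combos : List (List String) := []
  -- Horizontal
  let combos := puzzle.foldl (fun acc row => acc ++ [row]) combos
  -- Vertical
  let combos := (PySem.List.pyRange 0 numCols 1).foldl (fun acc colNum =>
      acc ++ [(PySem.List.pyRange 0 numRows 1).map (fun rowNum => pvCell puzzle rowNum colNum)]) combos
  -- Diagonals Up
  let combos := (PySem.List.pyRange 1 numRows 1).foldl (fun acc rowI =>
      let diag := pvScan puzzle (PySem.List.pyRange rowI (-1) (-1)) [] 0
      if diag ≠ [] then acc ++ [diag] else acc) combos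
  let combos := (PySem.List.pyRange 1 numCols 1).foldl (fun acc colI =>
      let diag := pvScanBrk puzzle numCols (PySem.List.pyRange (numRows - 1) (-1) (-1)) [] colI
      if diag ≠ [] then acc ++ [diag] else acc) combos
  -- Diagonals Down
  let combos := (PySem.List.pyRange 0 numRows 1).foldl (fun acc rowI =>
      let diag := pvScanBrk puzzle numCols (PySem.List.pyRange rowI numRows 1) [] 0
      if diag ≠ [] then acc ++ [diag] else acc) combos
  let combos := (PySem.List.pyRange 1 numCols 1).foldl (fun acc colI =>
      let diag := pvScanBrk puzzle numCols (PySem.List.pyRange 0 numRows 1) [] colI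
      if diag ≠ [] then acc ++ [diag] else acc) combos
  combos ++ combos.map List.reverse

-- ===== PORT B =====

-- body of B's single double loop: bucket puzzle[r][c] into the three dicts
-- (cols.setdefault(c,[]).append, anti.setdefault(r+c,[]).insert(0,·),
--  main.setdefault(r-c,[]).append — each is Dict.modify with default [])
def pvUpd (p : List (List String)) (r : Int)
    (st : PySem.Dict Int (List String) × PySem.Dict Int (List String) × PySem.Dict Int (List String))
    (c : Int) :
    PySem.Dict Int (List String) × PySem.Dict Int (List String) × PySem.Dict Int (List String) :=
  let cell := pvCell p r c
  (st.1.modify c [] (fun l => l ++ [cell]),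
   st.2.1.modify (r + c) [] (fun l => cell :: l),
   st.2.2.modify (r - c) [] (fun l => l ++ [cell]))

def all_combos_alt (puzzle : List (List String)) : List (List String) :=
  let numRows : Int := puzzle.length
  let numCols : Int := (PySem.List.pyGetD puzzle 0 []).length
  let st := (PySem.List.pyRange 0 numRows 1).foldl
      (fun st r => (PySem.List.pyRange 0 numCols 1).foldl (pvUpd puzzle r) st)
      (PySem.Dict.empty, PySem.Dict.empty, PySem.Dict.empty)
  let base := puzzle
    ++ (PySem.List.pyRange 0 numCols 1).map (fun c => st.1.getD c [])
    ++ (PySem.List.pyRange 1 (numRows + numCols - 1) 1).map (fun s => st.2.1.getD s [])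
    ++ (PySem.List.pyRange 0 numRows 1).map (fun d => st.2.2.getD d [])
    ++ (PySem.List.pyRange 1 numCols 1).map (fun d => st.2.2.getD (-d) [])
  base ++ base.map List.reverse

-- ===== PRECONDITION & SPEC =====
-- Exactly the inputs on which the Python A returns (otherwise it raises IndexError):
-- a nonempty grid whose every row has at least len(puzzle[0]) cells and with
-- len(puzzle) ≤ len(puzzle[0]) (more rows than columns makes A's first
-- unbounded up-diagonal loop run past the end of a row).
def Pre_all_combos (puzzle : List (List String)) : Prop :=
  puzzle ≠ [] ∧ puzzle.length ≤ (puzzle.headD []).length ∧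
    ∀ row ∈ puzzle, (puzzle.headD []).length ≤ row.length
instance (puzzle : List (List String)) : Decidable (Pre_all_combos puzzle) := by
  unfold Pre_all_combos; infer_instance

def pvWitness_all_combos : List (List String) := [["a", "b"], ["c", "d"]]

def Spec_all_combos (puzzle : List (List String)) (out : List (List String)) : Prop := out = all_combos_alt puzzle
instance (puzzle : List (List String)) (out : List (List String)) : Decidable (Spec_all_combos puzzle out) := by unfold Spec_all_combos; infer_instance

-- ===== CLAIM (what is proved, stated in full; the proofs are below) =====
def Claim_equal_all_combos : Prop := ∀ (puzzle : List (List String)), Dom_all_combos puzzle → Pre_all_combos puzzle → Spec_all_combos puzzle (all_combos puzzle)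

-- ===== LEMMAS AND PROOFS =====

-- the common closed form both ports are reduced to: rows, columns,
-- anti-diagonals s = 1..R+C-2 (rows descending), main diagonals
-- k = 0..R-1 then -1..-(C-1) (rows ascending), then all reversals
def pvClosed (puzzle : List (List String)) : List (List String) :=
  let numRows : Int := puzzle.length
  let numCols : Int := (PySem.List.pyGetD puzzle 0 []).length
  let base := puzzle
    ++ (PySem.List.pyRange 0 numCols 1).map (fun c =>
         puzzle.map (fun row => PySem.List.pyGetD row c ""))
    ++ (PySem.List.pyRange 1 (numRows + numCols - 1) 1).map (fun s =>
         (PySem.List.pyRange (min s (numRows - 1)) (max (s - numCols) (-1)) (-1)).map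
           (fun r => pvCell puzzle r (s - r)))
    ++ ((PySem.List.pyRange 0 numRows 1) ++ (PySem.List.pyRange 1 numCols 1).map (fun j => -j)).map
         (fun k => (PySem.List.pyRange (max k 0) (min numRows (numCols + k)) 1).map
           (fun r => pvCell puzzle r (r - k)))
  base ++ base.map List.reverse

theorem pvScan_desc (p : List (List String)) :
    ∀ (a : Nat) (acc : List String) (col : Int),
      pvScan p (PySem.List.pyRange (a : Int) (-1) (-1)) acc col
        = acc ++ (PySem.List.pyRange (a : Int) (-1) (-1)).map
            (fun r => pvCell p r (col + (a : Int) - r)) := by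
  intro a
  induction a with
  | zero =>
    intro acc col
    rw [PySem.List.pyRange_neg_one_cons (by norm_num), PySem.List.pyRange_neg_one_eq_nil (by norm_num)]
    simp [pvScan]
  | succ n ih =>
    intro acc col
    have h1 : ((n + 1 : Nat) : Int) = (n : Int) + 1 := by push_cast; ring
    have h2 : (n : Int) + 1 - 1 = (n : Int) := by ring
    rw [h1, PySem.List.pyRange_neg_one_cons (by omega), h2]
    simp only [pvScan]
    rw [ih]
    have hf : (fun r => pvCell p r (col + 1 + (n : Int) - r))
        = (fun r => pvCell p r (col + ((n : Int) + 1) - r)) := by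
      funext r; ring_nf
    have hc : col + ((n : Int) + 1) - ((n : Int) + 1) = col := by ring
    simp [hf, hc, List.append_assoc]

theorem pvScanBrk_desc (p : List (List String)) (C : Int) :
    ∀ (a : Nat) (acc : List String) (col : Int), col < C →
      pvScanBrk p C (PySem.List.pyRange (a : Int) (-1) (-1)) acc col
        = acc ++ (PySem.List.pyRange (a : Int) (max ((a : Int) - (C - col)) (-1)) (-1)).map
            (fun r => pvCell p r (col + (a : Int) - r)) := by
  intro a
  induction a with
  | zero =>
    intro acc col hcol
    simp only [Nat.cast_zero]
    have hmax : max ((0 : Int) - (C - col)) (-1) = -1 := by omega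
    rw [PySem.List.pyRange_neg_one_cons (by norm_num),
        PySem.List.pyRange_neg_one_eq_nil (by norm_num), hmax,
        PySem.List.pyRange_neg_one_cons (by norm_num),
        PySem.List.pyRange_neg_one_eq_nil (by norm_num)]
    by_cases h : col + 1 = C
    · simp [pvScanBrk, h]
    · simp [pvScanBrk, h]
  | succ n ih =>
    intro acc col hcol
    have h1 : ((n + 1 : Nat) : Int) = (n : Int) + 1 := by push_cast; ring
    have h2 : (n : Int) + 1 - 1 = (n : Int) := by ring
    rw [h1, PySem.List.pyRange_neg_one_cons (by omega), h2]
    by_cases h : col + 1 = C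
    · have hmax : max ((n : Int) + 1 - (C - col)) (-1) = (n : Int) := by omega
      have hsing : PySem.List.pyRange ((n : Int) + 1) (n : Int) (-1) = [(n : Int) + 1] := by
        rw [PySem.List.pyRange_neg_one_cons (by omega), h2,
            PySem.List.pyRange_neg_one_eq_nil le_rfl]
      rw [hmax, hsing]
      simp [pvScanBrk, h]
    · simp only [pvScanBrk]
      rw [if_neg (by simp [h])]
      rw [ih _ (col + 1) (by omega)]
      have hmax : max ((n : Int) - (C - (col + 1))) (-1) = max ((n : Int) + 1 - (C - col)) (-1) := by
        omega
      have hlt : max ((n : Int) + 1 - (C - col)) (-1) < (n : Int) + 1 := by omega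
      have hcons : PySem.List.pyRange ((n : Int) + 1) (max ((n : Int) + 1 - (C - col)) (-1)) (-1)
          = ((n : Int) + 1) :: PySem.List.pyRange (n : Int) (max ((n : Int) + 1 - (C - col)) (-1)) (-1) := by
        rw [PySem.List.pyRange_neg_one_cons hlt, h2]
      rw [hmax, hcons]
      have hf : (fun r => pvCell p r (col + 1 + (n : Int) - r))
          = (fun r => pvCell p r (col + ((n : Int) + 1) - r)) := by
        funext r; ring_nf
      have hc : col + ((n : Int) + 1) - ((n : Int) + 1) = col := by ring
      simp [hf, hc, List.append_assoc]

theorem pvScanBrk_asc (p : List (List String)) (C : Int) :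
    ∀ (n : Nat) (lo : Int) (acc : List String) (col : Int), col < C →
      pvScanBrk p C (PySem.List.pyRange lo (lo + (n : Int)) 1) acc col
        = acc ++ (PySem.List.pyRange lo (min (lo + (n : Int)) (lo + (C - col))) 1).map
            (fun r => pvCell p r (col + r - lo)) := by
  intro n
  induction n with
  | zero =>
    intro lo acc col hcol
    have hmin : min (lo + ((0 : Nat) : Int)) (lo + (C - col)) = lo := by
      simp only [Nat.cast_zero]; omega
    rw [hmin]
    simp only [Nat.cast_zero, add_zero]
    rw [PySem.List.pyRange_one_eq_nil le_rfl]
    simp [pvScanBrk]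
  | succ m ih =>
    intro lo acc col hcol
    have h1 : ((m + 1 : Nat) : Int) = (m : Int) + 1 := by push_cast; ring
    have hcons : PySem.List.pyRange lo (lo + ((m : Int) + 1)) 1
        = lo :: PySem.List.pyRange (lo + 1) ((lo + 1) + (m : Int)) 1 := by
      rw [PySem.List.pyRange_one_cons (by omega)]
      congr 1
      congr 1
      ring
    rw [h1, hcons]
    by_cases h : col + 1 = C
    · have hmin : min (lo + ((m : Int) + 1)) (lo + (C - col)) = lo + 1 := by omega
      rw [hmin, PySem.List.pyRange_one_singleton]
      simp [pvScanBrk, h]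
    · simp only [pvScanBrk]
      rw [if_neg (by simp [h])]
      rw [ih (lo + 1) _ (col + 1) (by omega)]
      have hmin : min ((lo + 1) + (m : Int)) ((lo + 1) + (C - (col + 1)))
          = min (lo + ((m : Int) + 1)) (lo + (C - col)) := by omega
      have hlt : lo < min (lo + ((m : Int) + 1)) (lo + (C - col)) := by omega
      have hcons2 : PySem.List.pyRange lo (min (lo + ((m : Int) + 1)) (lo + (C - col))) 1
          = lo :: PySem.List.pyRange (lo + 1) (min (lo + ((m : Int) + 1)) (lo + (C - col))) 1 :=
        PySem.List.pyRange_one_cons hlt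
      rw [hmin, hcons2]
      have hf : (fun r => pvCell p r (col + 1 + r - (lo + 1)))
          = (fun r => pvCell p r (col + r - lo)) := by
        funext r; ring_nf
      have hc : col + lo - lo = col := by ring
      simp [hf, hc, List.append_assoc]

theorem pyRange_one_map_shift {α : Type} (a b t : Int) (f : Int → α) :
    (PySem.List.pyRange a b 1).map (fun x => f (x + t))
      = (PySem.List.pyRange (a + t) (b + t) 1).map f := by
  rw [PySem.List.pyRange_one a b, PySem.List.pyRange_one (a + t) (b + t)]
  have hb : b + t - (a + t) = b - a := by ring
  rw [hb]
  simp only [List.map_map]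
  apply List.map_congr_left
  intro k _
  simp only [Function.comp]
  congr 1
  ring

-- A equals the closed form (the six scans reduced to explicit ranges)
theorem pvA_eq_closed (p : List (List String)) (hpre : Pre_all_combos p) :
    all_combos p = pvClosed p := by
  obtain ⟨hne, hRC, hrows⟩ := hpre
  have hhead : PySem.List.pyGetD p 0 [] = p.headD [] := by
    cases p with
    | nil => exact absurd rfl hne
    | cons h t => simp [PySem.List.pyGetD, PySem.List.pyGet?, PySem.List.pyIdx?]
  have hR1 : (1 : Int) ≤ (p.length : Int) := by
    have : p.length ≠ 0 := fun h => hne (List.eq_nil_of_length_eq_zero h)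
    omega
  have hRC' : ((p.length : Int)) ≤ (((p.headD []).length : Int)) := by exact_mod_cast hRC
  simp only [all_combos, pvClosed, hhead]
  have step : ∀ x y : List (List String), x = y →
      x ++ x.map List.reverse = y ++ y.map List.reverse := by
    intro x y h; rw [h]
  apply step
  -- rows
  rw [PySem.List.foldl_append_singleton_eq_self, List.nil_append]
  -- columns
  rw [PySem.List.foldl_append_singleton_eq_map]
  have hcol : ∀ c : Int, (PySem.List.pyRange 0 (p.length : Int)).map (fun rowNum => pvCell p rowNum c)
      = p.map (fun row => PySem.List.pyGetD row c "") := by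
    intro c
    conv_lhs => rw [show (fun rowNum => pvCell p rowNum c)
      = ((fun row => PySem.List.pyGetD row c "") ∘ (fun j => PySem.List.pyGetD p j ([] : List String))) from rfl]
    rw [← List.map_map, PySem.List.map_pyGetD_pyRange_zero']
  have hcolfun : (fun c => (PySem.List.pyRange 0 (p.length : Int)).map (fun rowNum => pvCell p rowNum c))
      = (fun c => p.map (fun row => PySem.List.pyGetD row c "")) := funext hcol
  rw [hcolfun]
  -- up1
  have h3 : ∀ (acc : List (List String)), ∀ s ∈ PySem.List.pyRange 1 (p.length : Int),
      (if pvScan p (PySem.List.pyRange s (-1) (-1)) [] 0 ≠ [] then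
        acc ++ [pvScan p (PySem.List.pyRange s (-1) (-1)) [] 0] else acc)
      = acc ++ [(PySem.List.pyRange (min s ((p.length : Int) - 1))
          (max (s - ((p.headD []).length : Int)) (-1)) (-1)).map (fun r => pvCell p r (s - r))] := by
    intro acc s hs
    rw [PySem.List.mem_pyRange_one] at hs
    have key := pvScan_desc p s.toNat [] 0
    rw [show ((s.toNat : Nat) : Int) = s from by omega] at key
    rw [key]
    have hcond : ([] : List String) ++ (PySem.List.pyRange s (-1) (-1)).map
        (fun r => pvCell p r (0 + s - r)) ≠ [] := by
      rw [PySem.List.pyRange_neg_one_cons (by omega)]; simp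
    rw [if_pos hcond]
    have hm1 : min s ((p.length : Int) - 1) = s := by omega
    have hm2 : max (s - ((p.headD []).length : Int)) (-1) = -1 := by omega
    rw [hm1, hm2]
    simp
  rw [PySem.List.foldl_congr_mem _ _ _ _ h3, PySem.List.foldl_append_singleton_eq_map]
  -- up2
  have h4 : ∀ (acc : List (List String)), ∀ colI ∈ PySem.List.pyRange 1 ((p.headD []).length : Int),
      (if pvScanBrk p ((p.headD []).length : Int) (PySem.List.pyRange ((p.length : Int) - 1) (-1) (-1)) [] colI ≠ [] then
        acc ++ [pvScanBrk p ((p.headD []).length : Int) (PySem.List.pyRange ((p.length : Int) - 1) (-1) (-1)) [] colI] else acc)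
      = acc ++ [(PySem.List.pyRange (min (colI + ((p.length : Int) - 1)) ((p.length : Int) - 1))
          (max ((colI + ((p.length : Int) - 1)) - ((p.headD []).length : Int)) (-1)) (-1)).map
            (fun r => pvCell p r ((colI + ((p.length : Int) - 1)) - r))] := by
    intro acc colI hc
    rw [PySem.List.mem_pyRange_one] at hc
    have key := pvScanBrk_desc p ((p.headD []).length : Int) ((p.length : Int) - 1).toNat [] colI (by omega)
    rw [show ((((p.length : Int) - 1).toNat : Nat) : Int) = (p.length : Int) - 1 from by omega] at key
    rw [key]
    have hcond : ([] : List String) ++ (PySem.List.pyRange ((p.length : Int) - 1)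
        (max (((p.length : Int) - 1) - (((p.headD []).length : Int) - colI)) (-1)) (-1)).map
        (fun r => pvCell p r (colI + ((p.length : Int) - 1) - r)) ≠ [] := by
      rw [PySem.List.pyRange_neg_one_cons (by omega)]; simp
    rw [if_pos hcond]
    have hm1 : min (colI + ((p.length : Int) - 1)) ((p.length : Int) - 1) = (p.length : Int) - 1 := by omega
    have hm2 : (colI + ((p.length : Int) - 1)) - ((p.headD []).length : Int)
        = ((p.length : Int) - 1) - (((p.headD []).length : Int) - colI) := by ring
    rw [hm1, hm2]
    simp
  rw [PySem.List.foldl_congr_mem _ _ _ _ h4, PySem.List.foldl_append_singleton_eq_map]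
  -- down1
  have h5 : ∀ (acc : List (List String)), ∀ rowI ∈ PySem.List.pyRange 0 (p.length : Int),
      (if pvScanBrk p ((p.headD []).length : Int) (PySem.List.pyRange rowI (p.length : Int)) [] 0 ≠ [] then
        acc ++ [pvScanBrk p ((p.headD []).length : Int) (PySem.List.pyRange rowI (p.length : Int)) [] 0] else acc)
      = acc ++ [(PySem.List.pyRange (max rowI 0) (min (p.length : Int) (((p.headD []).length : Int) + rowI))).map
          (fun r => pvCell p r (r - rowI))] := by
    intro acc rowI hr
    rw [PySem.List.mem_pyRange_one] at hr
    have key := pvScanBrk_asc p ((p.headD []).length : Int) ((p.length : Int) - rowI).toNat rowI [] 0 (by omega)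
    rw [show rowI + ((((p.length : Int) - rowI).toNat : Nat) : Int) = (p.length : Int) from by omega] at key
    rw [key]
    have hcond : ([] : List String) ++ (PySem.List.pyRange rowI
        (min (p.length : Int) (rowI + (((p.headD []).length : Int) - 0)))).map
        (fun r => pvCell p r (0 + r - rowI)) ≠ [] := by
      rw [PySem.List.pyRange_one_cons (by omega)]; simp
    rw [if_pos hcond]
    have hm1 : max rowI 0 = rowI := by omega
    have hm2 : min (p.length : Int) (rowI + (((p.headD []).length : Int) - 0))
        = min (p.length : Int) (((p.headD []).length : Int) + rowI) := by omega
    rw [hm1, hm2]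
    simp
  rw [PySem.List.foldl_congr_mem _ _ _ _ h5, PySem.List.foldl_append_singleton_eq_map]
  -- down2
  have h6 : ∀ (acc : List (List String)), ∀ colI ∈ PySem.List.pyRange 1 ((p.headD []).length : Int),
      (if pvScanBrk p ((p.headD []).length : Int) (PySem.List.pyRange 0 (p.length : Int)) [] colI ≠ [] then
        acc ++ [pvScanBrk p ((p.headD []).length : Int) (PySem.List.pyRange 0 (p.length : Int)) [] colI] else acc)
      = acc ++ [(PySem.List.pyRange (max (-colI) 0) (min (p.length : Int) (((p.headD []).length : Int) + -colI))).map
          (fun r => pvCell p r (r - -colI))] := by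
    intro acc colI hc
    rw [PySem.List.mem_pyRange_one] at hc
    have key := pvScanBrk_asc p ((p.headD []).length : Int) p.length 0 [] colI (by omega)
    simp only [zero_add] at key
    rw [key]
    have hcond : ([] : List String) ++ (PySem.List.pyRange 0
        (min (p.length : Int) (((p.headD []).length : Int) - colI))).map
        (fun r => pvCell p r (colI + r - 0)) ≠ [] := by
      rw [PySem.List.pyRange_one_cons (by omega)]; simp
    rw [if_pos hcond]
    have hm1 : max (-colI) 0 = 0 := by omega
    have hm2 : min (p.length : Int) (((p.headD []).length : Int) - colI)
        = min (p.length : Int) (((p.headD []).length : Int) + -colI) := by omega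
    have hf : (fun r => pvCell p r (colI + r - 0)) = (fun r => pvCell p r (r - -colI)) := by
      funext r; ring_nf
    rw [hm1, hm2, hf]
    simp
  rw [PySem.List.foldl_congr_mem _ _ _ _ h6, PySem.List.foldl_append_singleton_eq_map]
  -- closed-form side: split the anti-diagonal range at R and shift, split the main-diagonal keys
  rw [PySem.List.pyRange_one_append 1 ((p.length : Int)) ((p.length : Int) + ((p.headD []).length : Int) - 1)
      (by omega) (by omega), List.map_append, List.map_append, List.map_map]
  have hshift := pyRange_one_map_shift 1 (((p.headD []).length : Int)) ((p.length : Int) - 1)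
    (fun s => List.map (fun r => pvCell p r (s - r))
      (PySem.List.pyRange (min s ((p.length : Int) - 1)) (max (s - ((p.headD []).length : Int)) (-1)) (-1)))
  rw [show (1 : Int) + ((p.length : Int) - 1) = (p.length : Int) from by ring] at hshift
  rw [show ((p.headD []).length : Int) + ((p.length : Int) - 1)
      = (p.length : Int) + ((p.headD []).length : Int) - 1 from by ring] at hshift
  rw [← hshift]
  simp [List.append_assoc, Function.comp_def]

-- B-side: what one full row pass does to the three dicts' values
theorem pvUpd_inner (p : List (List String)) (r : Int) :
    ∀ (n : Nat)
      (st : PySem.Dict Int (List String) × PySem.Dict Int (List String) × PySem.Dict Int (List String))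
      (k : Int),
      (((PySem.List.pyRange 0 (n : Int) 1).foldl (pvUpd p r) st).1.getD k []
          = st.1.getD k [] ++ (if 0 ≤ k ∧ k < (n : Int) then [pvCell p r k] else []))
      ∧ (((PySem.List.pyRange 0 (n : Int) 1).foldl (pvUpd p r) st).2.1.getD k []
          = (if 0 ≤ k - r ∧ k - r < (n : Int) then [pvCell p r (k - r)] else []) ++ st.2.1.getD k [])
      ∧ (((PySem.List.pyRange 0 (n : Int) 1).foldl (pvUpd p r) st).2.2.getD k []
          = st.2.2.getD k [] ++ (if 0 ≤ r - k ∧ r - k < (n : Int) then [pvCell p r (r - k)] else [])) := by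
  intro n
  induction n with
  | zero =>
    intro st k
    rw [show ((0 : Nat) : Int) = (0 : Int) from rfl, PySem.List.pyRange_one_eq_nil le_rfl]
    have hno : ∀ a : Int, ¬ (0 ≤ a ∧ a < (0 : Int)) := by omega
    refine ⟨?_, ?_, ?_⟩ <;> simp [hno]
  | succ n ih =>
    intro st k
    have h1 : ((n + 1 : Nat) : Int) = (n : Int) + 1 := by push_cast; ring
    rw [h1, PySem.List.pyRange_one_succ_right (by omega), List.foldl_append]
    simp only [List.foldl_cons, List.foldl_nil]
    obtain ⟨ih1, ih2, ih3⟩ := ih st k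
    refine ⟨?_, ?_, ?_⟩
    · show ((((PySem.List.pyRange 0 (n : Int) 1).foldl (pvUpd p r) st)).1.modify (n : Int) []
          (fun l => l ++ [pvCell p r (n : Int)])).getD k [] = _
      rw [PySem.Dict.getD_modify]
      by_cases hk : k = (n : Int)
      · subst hk
        rw [if_pos rfl, ih1, if_neg (by omega), if_pos (by omega)]
        simp
      · rw [if_neg hk, ih1]
        by_cases hc : 0 ≤ k ∧ k < (n : Int)
        · rw [if_pos hc, if_pos (by omega)]
        · rw [if_neg hc, if_neg (by omega)]
    · show ((((PySem.List.pyRange 0 (n : Int) 1).foldl (pvUpd p r) st)).2.1.modify (r + (n : Int)) []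
          (fun l => pvCell p r (n : Int) :: l)).getD k [] = _
      rw [PySem.Dict.getD_modify]
      by_cases hk : k = r + (n : Int)
      · subst hk
        rw [if_pos rfl, ih2, if_neg (by omega), if_pos (by omega)]
        simp [show r + (n : Int) - r = (n : Int) from by ring]
      · rw [if_neg hk, ih2]
        by_cases hc : 0 ≤ k - r ∧ k - r < (n : Int)
        · rw [if_pos hc, if_pos (by omega)]
        · rw [if_neg hc, if_neg (by omega)]
    · show ((((PySem.List.pyRange 0 (n : Int) 1).foldl (pvUpd p r) st)).2.2.modify (r - (n : Int)) []
          (fun l => l ++ [pvCell p r (n : Int)])).getD k [] = _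
      rw [PySem.Dict.getD_modify]
      by_cases hk : k = r - (n : Int)
      · subst hk
        rw [if_pos rfl, ih3, if_neg (by omega), if_pos (by omega)]
        simp [show r - (r - (n : Int)) = (n : Int) from by ring]
      · rw [if_neg hk, ih3]
        by_cases hc : 0 ≤ r - k ∧ r - k < (n : Int)
        · rw [if_pos hc, if_pos (by omega)]
        · rw [if_neg hc, if_neg (by omega)]

-- B-side: closed forms of the three dicts after the whole double pass
theorem pvUpd_outer (p : List (List String)) (C : Nat) :
    ∀ (m : Nat) (k : Int),
      ((((PySem.List.pyRange 0 (m : Int) 1).foldl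
          (fun st r => (PySem.List.pyRange 0 (C : Int) 1).foldl (pvUpd p r) st)
          (PySem.Dict.empty, PySem.Dict.empty, PySem.Dict.empty))).1.getD k []
          = if 0 ≤ k ∧ k < (C : Int) then (PySem.List.pyRange 0 (m : Int) 1).map (fun r => pvCell p r k) else [])
      ∧ ((((PySem.List.pyRange 0 (m : Int) 1).foldl
          (fun st r => (PySem.List.pyRange 0 (C : Int) 1).foldl (pvUpd p r) st)
          (PySem.Dict.empty, PySem.Dict.empty, PySem.Dict.empty))).2.1.getD k []
          = (PySem.List.pyRange (min k ((m : Int) - 1)) (max (k - (C : Int)) (-1)) (-1)).map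
              (fun r => pvCell p r (k - r)))
      ∧ ((((PySem.List.pyRange 0 (m : Int) 1).foldl
          (fun st r => (PySem.List.pyRange 0 (C : Int) 1).foldl (pvUpd p r) st)
          (PySem.Dict.empty, PySem.Dict.empty, PySem.Dict.empty))).2.2.getD k []
          = (PySem.List.pyRange (max k 0) (min (m : Int) ((C : Int) + k)) 1).map
              (fun r => pvCell p r (r - k))) := by
  intro m
  induction m with
  | zero =>
    intro k
    rw [show ((0 : Nat) : Int) = (0 : Int) from rfl, PySem.List.pyRange_one_eq_nil le_rfl]
    refine ⟨?_, ?_, ?_⟩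
    · simp [PySem.Dict.getD_empty]
    · rw [PySem.List.pyRange_neg_one_eq_nil (by omega)]
      simp [PySem.Dict.getD_empty]
    · rw [PySem.List.pyRange_one_eq_nil
          (show min (0 : Int) ((C : Int) + k) ≤ max k 0 by omega)]
      simp [PySem.Dict.getD_empty]
  | succ m ih =>
    intro k
    have h1 : ((m + 1 : Nat) : Int) = (m : Int) + 1 := by push_cast; ring
    rw [h1, PySem.List.pyRange_one_succ_right (by omega), List.foldl_append]
    simp only [List.foldl_cons, List.foldl_nil]
    obtain ⟨ih1, ih2, ih3⟩ := ih k
    obtain ⟨in1, in2, in3⟩ := pvUpd_inner p (m : Int) C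
      ((PySem.List.pyRange 0 (m : Int) 1).foldl
        (fun st r => (PySem.List.pyRange 0 (C : Int) 1).foldl (pvUpd p r) st)
        (PySem.Dict.empty, PySem.Dict.empty, PySem.Dict.empty)) k
    refine ⟨?_, ?_, ?_⟩
    · rw [in1, ih1]
      by_cases hc : 0 ≤ k ∧ k < (C : Int)
      · simp [hc, List.map_append]
      · simp [hc]
    · rw [in2, ih2]
      by_cases hc : 0 ≤ k - (m : Int) ∧ k - (m : Int) < (C : Int)
      · rw [if_pos hc]
        have hmin1 : min k ((m : Int) + 1 - 1) = (m : Int) := by omega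
        have hmin2 : min k ((m : Int) - 1) = (m : Int) - 1 := by omega
        rw [hmin1, hmin2,
            PySem.List.pyRange_neg_one_cons (show max (k - (C : Int)) (-1) < (m : Int) by omega)]
        simp
      · rw [if_neg hc, List.nil_append]
        by_cases hk : k < (m : Int)
        · have heq : min k ((m : Int) - 1) = min k ((m : Int) + 1 - 1) := by omega
          rw [heq]
        · -- k ≥ m and the bucket untouched, so k ≥ m + C: both ranges empty
          have hge : (m : Int) + (C : Int) ≤ k := by omega
          rw [PySem.List.pyRange_neg_one_eq_nil
                (show min k ((m : Int) - 1) ≤ max (k - (C : Int)) (-1) by omega),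
              PySem.List.pyRange_neg_one_eq_nil
                (show min k ((m : Int) + 1 - 1) ≤ max (k - (C : Int)) (-1) by omega)]
    · rw [in3, ih3]
      by_cases hc : 0 ≤ (m : Int) - k ∧ (m : Int) - k < (C : Int)
      · rw [if_pos hc]
        have hmin1 : min ((m : Int) + 1) ((C : Int) + k) = (m : Int) + 1 := by omega
        have hmin2 : min ((m : Int)) ((C : Int) + k) = (m : Int) := by omega
        rw [hmin1, hmin2,
            PySem.List.pyRange_one_succ_right (show max k 0 ≤ (m : Int) by omega),
            List.map_append]
        simp
      · rw [if_neg hc, List.append_nil]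
        by_cases hk : (m : Int) < k
        · rw [PySem.List.pyRange_one_eq_nil
                (show min ((m : Int)) ((C : Int) + k) ≤ max k 0 by omega),
              PySem.List.pyRange_one_eq_nil
                (show min ((m : Int) + 1) ((C : Int) + k) ≤ max k 0 by omega)]
        · -- k ≤ m and not (m - k < C) so m ≥ C + k: min unchanged
          have heq : min ((m : Int)) ((C : Int) + k) = min ((m : Int) + 1) ((C : Int) + k) := by omega
          rw [heq]

-- B equals the closed form
theorem pvB_eq_closed (p : List (List String)) (hpre : Pre_all_combos p) :
    all_combos_alt p = pvClosed p := by
  obtain ⟨hne, hRC, hrows⟩ := hpre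
  have hhead : PySem.List.pyGetD p 0 [] = p.headD [] := by
    cases p with
    | nil => exact absurd rfl hne
    | cons h t => simp [PySem.List.pyGetD, PySem.List.pyGet?, PySem.List.pyIdx?]
  simp only [all_combos_alt, pvClosed, hhead]
  have step : ∀ x y : List (List String), x = y →
      x ++ x.map List.reverse = y ++ y.map List.reverse := by
    intro x y h; rw [h]
  apply step
  have hout := pvUpd_outer p (p.headD []).length p.length
  -- columns
  have hcols : (PySem.List.pyRange 0 (((p.headD []).length : Nat) : Int) 1).map
      (fun c => (((PySem.List.pyRange 0 ((p.length : Nat) : Int) 1).foldl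
          (fun st r => (PySem.List.pyRange 0 (((p.headD []).length : Nat) : Int) 1).foldl (pvUpd p r) st)
          (PySem.Dict.empty, PySem.Dict.empty, PySem.Dict.empty))).1.getD c [])
      = (PySem.List.pyRange 0 (((p.headD []).length : Nat) : Int) 1).map
          (fun c => p.map (fun row => PySem.List.pyGetD row c "")) := by
    apply List.map_congr_left
    intro c hc
    rw [PySem.List.mem_pyRange_one] at hc
    rw [(pvUpd_outer p (p.headD []).length p.length c).1, if_pos (by omega)]
    conv_lhs => rw [show (fun r => pvCell p r c)
      = ((fun row => PySem.List.pyGetD row c "") ∘ (fun j => PySem.List.pyGetD p j ([] : List String))) from rfl]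
    rw [← List.map_map, PySem.List.map_pyGetD_pyRange_zero']
  -- anti-diagonals and main diagonals: the closed forms hold for every key
  have hanti : (fun s => (((PySem.List.pyRange 0 ((p.length : Nat) : Int) 1).foldl
          (fun st r => (PySem.List.pyRange 0 (((p.headD []).length : Nat) : Int) 1).foldl (pvUpd p r) st)
          (PySem.Dict.empty, PySem.Dict.empty, PySem.Dict.empty))).2.1.getD s [])
      = (fun s => (PySem.List.pyRange (min s (((p.length : Nat) : Int) - 1))
          (max (s - (((p.headD []).length : Nat) : Int)) (-1)) (-1)).map
            (fun r => pvCell p r (s - r))) := by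
    funext s
    exact (pvUpd_outer p (p.headD []).length p.length s).2.1
  have hmain : (fun d => (((PySem.List.pyRange 0 ((p.length : Nat) : Int) 1).foldl
          (fun st r => (PySem.List.pyRange 0 (((p.headD []).length : Nat) : Int) 1).foldl (pvUpd p r) st)
          (PySem.Dict.empty, PySem.Dict.empty, PySem.Dict.empty))).2.2.getD d [])
      = (fun d => (PySem.List.pyRange (max d 0)
          (min ((p.length : Nat) : Int) ((((p.headD []).length : Nat) : Int) + d)) 1).map
            (fun r => pvCell p r (r - d))) := by
    funext d
    exact (pvUpd_outer p (p.headD []).length p.length d).2.2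
  rw [hcols, hanti, hmain, List.map_append, List.map_map]
  simp only [List.append_assoc, Function.comp_def]
  simp
  intro a _ _
  have h := (pvUpd_outer p (p.headD []).length p.length (-a)).2.2
  simpa using h

-- ===== VERDICT (by name: the statement is the Claim_ definition above) =====
theorem all_combos_spec : Claim_equal_all_combos := by
  intro p _hdom hpre
  unfold Spec_all_combos
  rw [pvA_eq_closed p hpre, pvB_eq_closed p hpre]
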